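-- pv_equiv track=rewrite | github.com/dmoratz/space_research | scripts/splitters/split_dune.py | find_chapter_start
-- ===== SOURCE A (Python) =====
-- def find_chapter_start(lines: list[str], em_dash_line: int, prev_boundary: int) -> int:
--     """
--     Walk backward from the em-dash line to find where the chapter starts.
--     The chapter boundary is at the first non-blank line after a gap of
--     5+ blank lines (which separates chapters).
--     """
--     # Start from em_dash_line and walk back looking for blank-line gap
--     i = em_dash_line - 1
--     while i > prev_boundary:
--         # Count consecutive blank lines going backward from position i
--         blank_count = 0
--         j = i
--         while j > prev_boundary and not lines[j].strip():
--             blank_count += 1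
--             j -= 1
--         if blank_count >= 5:
--             # Found a gap — chapter starts at i (first blank after gap edge)
--             # The gap is from j+1 to i. Chapter starts at j+blank_count+...
--             # Actually: the gap runs j+1..i (inclusive), and the chapter starts
--             # at the first non-blank line AFTER i, which is i+1... but we want
--             # the blank line before the first text (to preserve the space).
--             # Return the first line of content (j+blank_count+1 = i+1)
--             return i + 1
--         if blank_count > 0:
--             # Skip past these blanks
--             i = j
--         else:
--             i -= 1
--     return prev_boundary + 1
-- ===== SOURCE B (Python) =====
-- def find_chapter_start(lines: list[str], em_dash_line: int, prev_boundary: int) -> int: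
--     """One flat backward pass with a running count of consecutive blank lines."""
--     blanks = 0
--     i = em_dash_line - 1
--     while i > prev_boundary:
--         if lines[i].strip():
--             blanks = 0
--         else:
--             blanks += 1
--             if blanks == 5:
--                 # run of 5 blanks tops out at i + 4; chapter starts right after it
--                 return i + 5
--         i -= 1
--     return prev_boundary + 1
-- ===== Notes on version B (the rewrite author's own statement) =====
-- stated objective: simpler
-- what changed: Replaced A's nested loops (outer position walk plus inner blank-run counting pass that re-scans each run) with a single flat backward loop keeping a running counter of consecutive blank lines, returning i+5 the moment the counter reaches 5.
-- outside the precondition, e.g. on find_chapter_start(['x', '', '', '', '', ''], 6, -100): A returns 6, B returns 6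
import Mathlib
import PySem

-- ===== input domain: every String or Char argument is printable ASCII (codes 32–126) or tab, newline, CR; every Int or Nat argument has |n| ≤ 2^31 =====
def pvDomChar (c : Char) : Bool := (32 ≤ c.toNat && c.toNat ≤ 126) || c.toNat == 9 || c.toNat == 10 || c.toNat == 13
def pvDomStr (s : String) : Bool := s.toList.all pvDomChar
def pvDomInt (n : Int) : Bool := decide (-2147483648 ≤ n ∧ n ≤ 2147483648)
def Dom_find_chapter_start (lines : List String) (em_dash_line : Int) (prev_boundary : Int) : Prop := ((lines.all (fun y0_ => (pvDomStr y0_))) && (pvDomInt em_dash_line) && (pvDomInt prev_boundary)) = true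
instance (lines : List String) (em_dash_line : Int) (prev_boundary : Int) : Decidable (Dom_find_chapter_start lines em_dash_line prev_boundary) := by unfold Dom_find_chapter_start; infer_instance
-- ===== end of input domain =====

-- B replaces A's nested count-then-skip loops by one flat backward pass with a
-- running blank counter (objective: simpler).

-- ===== PORT A =====
-- A's inner while loop: count consecutive blank lines going backward from j;
-- returns (blank_count, final j).  The Nat fuel only makes the loop total: it is
-- the loop measure j - prev_boundary, so it never runs out before the guard fails.
-- A 'none' from pyGet? is Python's IndexError (excluded by Pre_); the port stops there.
def fcsInnerGo (lines : List String) (prev_boundary : Int) : Nat → Int → Int → Int × Int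
  | 0, j, bc => (bc, j)
  | Nat.succ fuel, j, bc =>
    if j > prev_boundary then
      match PySem.List.pyGet? lines j with
      | none => (bc, j)   -- IndexError in Python; outside Pre_
      | some s =>
        if PySem.Str.strip s = "" then fcsInnerGo lines prev_boundary fuel (j - 1) (bc + 1)
        else (bc, j)
    else (bc, j)

def fcsInner (lines : List String) (prev_boundary : Int) (j : Int) (bc : Int) : Int × Int :=
  fcsInnerGo lines prev_boundary (j - prev_boundary).toNat j bc

-- A's outer while loop (fuel = loop measure i - prev_boundary; i strictly
-- decreases each iteration, so the fuel never runs out before the guard fails)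
def fcsOuterGo (lines : List String) (prev_boundary : Int) : Nat → Int → Int
  | 0, _ => prev_boundary + 1
  | Nat.succ fuel, i =>
    if i > prev_boundary then
      let r := fcsInner lines prev_boundary i 0
      if r.1 ≥ 5 then i + 1
      else if r.1 > 0 then fcsOuterGo lines prev_boundary fuel r.2
      else fcsOuterGo lines prev_boundary fuel (i - 1)
    else prev_boundary + 1

def find_chapter_start (lines : List String) (em_dash_line : Int) (prev_boundary : Int) : Int :=
  fcsOuterGo lines prev_boundary (em_dash_line - 1 - prev_boundary).toNat (em_dash_line - 1)

-- ===== PORT B =====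
-- B's single backward loop with a running counter c of consecutive blank lines
-- (fuel = loop measure i - prev_boundary, in lock-step with i)
def fcsScanGo (lines : List String) (prev_boundary : Int) : Nat → Int → Int → Int
  | 0, _, _ => prev_boundary + 1
  | Nat.succ fuel, i, c =>
    if i > prev_boundary then
      match PySem.List.pyGet? lines i with
      | none => fcsScanGo lines prev_boundary fuel (i - 1) 0   -- IndexError in Python; outside Pre_
      | some s =>
        if PySem.Str.strip s = "" then
          if c + 1 = 5 then i + 5
          else fcsScanGo lines prev_boundary fuel (i - 1) (c + 1)
        else fcsScanGo lines prev_boundary fuel (i - 1) 0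
    else prev_boundary + 1

def find_chapter_start_alt (lines : List String) (em_dash_line : Int) (prev_boundary : Int) : Int :=
  fcsScanGo lines prev_boundary (em_dash_line - 1 - prev_boundary).toNat (em_dash_line - 1) 0

-- ===== PRECONDITION & SPEC =====
-- Pre_ excludes calls whose backward scan can leave the valid index range
-- [-len, len): there Python raises IndexError, except in the accidental corner
-- where negative-index wraparound lets a 5-blank gap end the scan before the
-- first out-of-range read and A still returns a value (B returns the same value
-- there in Python).
def Pre_find_chapter_start (lines : List String) (em_dash_line : Int) (prev_boundary : Int) : Prop :=
  em_dash_line ≤ prev_boundary + 1 ∨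
    (em_dash_line ≤ (lines.length : Int) ∧ -((lines.length : Int) + 1) ≤ prev_boundary)

instance (lines : List String) (em_dash_line : Int) (prev_boundary : Int) : Decidable (Pre_find_chapter_start lines em_dash_line prev_boundary) := by unfold Pre_find_chapter_start; infer_instance

def pvWitness_find_chapter_start : List String × Int × Int := (["Chapter I", "", "text"], 3, 0)

def Spec_find_chapter_start (lines : List String) (em_dash_line : Int) (prev_boundary : Int) (out : Int) : Prop := out = find_chapter_start_alt lines em_dash_line prev_boundary
instance (lines : List String) (em_dash_line : Int) (prev_boundary : Int) (out : Int) : Decidable (Spec_find_chapter_start lines em_dash_line prev_boundary out) := by unfold Spec_find_chapter_start; infer_instance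

-- ===== CLAIM (what is proved, stated in full; the proofs are below) =====
def Claim_equal_find_chapter_start : Prop := ∀ (lines : List String) (em_dash_line : Int) (prev_boundary : Int), Dom_find_chapter_start lines em_dash_line prev_boundary → Pre_find_chapter_start lines em_dash_line prev_boundary → Spec_find_chapter_start lines em_dash_line prev_boundary (find_chapter_start lines em_dash_line prev_boundary)

-- ===== LEMMAS AND PROOFS =====

-- proof-only helper: position k of lines is a blank line
def pvBlank (lines : List String) (k : Int) : Bool :=
  match PySem.List.pyGet? lines k with
  | none => false
  | some s => PySem.Str.strip s = ""

theorem pvBlank_true_iff (lines : List String) (k : Int) :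
    pvBlank lines k = true ↔ ∃ s, PySem.List.pyGet? lines k = some s ∧ PySem.Str.strip s = "" := by
  unfold pvBlank
  cases h : PySem.List.pyGet? lines k with
  | none => simp
  | some s => simp

-- full characterisation of A's inner loop (given enough fuel for the measure):
-- result (bc + b, j - b) where the b positions j, …, j-b+1 are blank and
-- > prev_boundary, and the loop stopped at the boundary or at a non-blank line
theorem fcsInnerGo_spec (lines : List String) (prev_boundary : Int) :
    ∀ (n : ℕ) (j bc : Int), (j - prev_boundary).toNat ≤ n →
      bc ≤ (fcsInnerGo lines prev_boundary n j bc).1 ∧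
      (fcsInnerGo lines prev_boundary n j bc).2 = j - ((fcsInnerGo lines prev_boundary n j bc).1 - bc) ∧
      (∀ k : Int, (fcsInnerGo lines prev_boundary n j bc).2 < k → k ≤ j →
        prev_boundary < k ∧ pvBlank lines k = true) ∧
      ((fcsInnerGo lines prev_boundary n j bc).2 ≤ prev_boundary ∨
        pvBlank lines (fcsInnerGo lines prev_boundary n j bc).2 = false) := by
  intro n
  induction n with
  | zero =>
    intro j bc hn
    refine ⟨le_refl _, by simp [fcsInnerGo], ?_, ?_⟩
    · intro k h1 h2; simp [fcsInnerGo] at h1; omega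
    · exact Or.inl (by simp [fcsInnerGo]; omega)
  | succ n ih =>
    intro j bc hn
    by_cases hj : j > prev_boundary
    · cases hget : PySem.List.pyGet? lines j with
      | none =>
        simp only [fcsInnerGo, if_pos hj, hget]
        refine ⟨le_refl _, by omega, by intro k h1 h2; omega, Or.inr ?_⟩
        unfold pvBlank; rw [hget]
      | some s =>
        by_cases hs : PySem.Str.strip s = ""
        · simp only [fcsInnerGo, if_pos hj, hget, if_pos hs]
          obtain ⟨ih1, ih2, ih3, ih4⟩ := ih (j - 1) (bc + 1) (by omega)
          refine ⟨by omega, by omega, ?_, ih4⟩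
          intro k h1 h2
          by_cases hkj : k ≤ j - 1
          · exact ih3 k h1 hkj
          · have hkj' : k = j := by omega
            rw [hkj']
            exact ⟨hj, (pvBlank_true_iff lines j).mpr ⟨s, hget, hs⟩⟩
        · simp only [fcsInnerGo, if_pos hj, hget, if_neg hs]
          refine ⟨le_refl _, by omega, by intro k h1 h2; omega, Or.inr ?_⟩
          unfold pvBlank; rw [hget]; simp [hs]
    · simp only [fcsInnerGo, if_neg hj]
      exact ⟨le_refl _, by omega, by intro k h1 h2; omega, Or.inl (by omega)⟩

theorem fcsInner_spec (lines : List String) (prev_boundary : Int) (j bc : Int) :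
    bc ≤ (fcsInner lines prev_boundary j bc).1 ∧
    (fcsInner lines prev_boundary j bc).2 = j - ((fcsInner lines prev_boundary j bc).1 - bc) ∧
    (∀ k : Int, (fcsInner lines prev_boundary j bc).2 < k → k ≤ j →
      prev_boundary < k ∧ pvBlank lines k = true) ∧
    ((fcsInner lines prev_boundary j bc).2 ≤ prev_boundary ∨
      pvBlank lines (fcsInner lines prev_boundary j bc).2 = false) :=
  fcsInnerGo_spec lines prev_boundary (j - prev_boundary).toNat j bc (le_refl _)

-- B's scan does not depend on the fuel as long as it covers the loop measure
theorem fcsScanGo_fuel (lines : List String) (prev_boundary : Int) :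
    ∀ (n m : ℕ) (i c : Int), (i - prev_boundary).toNat ≤ n → (i - prev_boundary).toNat ≤ m →
      fcsScanGo lines prev_boundary n i c = fcsScanGo lines prev_boundary m i c := by
  intro n
  induction n with
  | zero =>
    intro m i c hn hm
    have hi : ¬ i > prev_boundary := by omega
    cases m with
    | zero => rfl
    | succ m => simp only [fcsScanGo, if_neg hi]
  | succ n ih =>
    intro m i c hn hm
    by_cases hi : i > prev_boundary
    · cases m with
      | zero => omega
      | succ m =>
        simp only [fcsScanGo, if_pos hi]
        cases hget : PySem.List.pyGet? lines i with
        | none => exact ih m (i - 1) 0 (by omega) (by omega)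
        | some s =>
          by_cases hs : PySem.Str.strip s = ""
          · simp only [if_pos hs]
            by_cases h5 : c + 1 = 5
            · rw [if_pos h5, if_pos h5]
            · rw [if_neg h5, if_neg h5]
              exact ih m (i - 1) (c + 1) (by omega) (by omega)
          · simp only [if_neg hs]
            exact ih m (i - 1) 0 (by omega) (by omega)
    · cases m with
      | zero => simp only [fcsScanGo, if_neg hi]
      | succ m => simp only [fcsScanGo, if_neg hi]

-- stepping B's scan through b blank positions just adds b to the counter
theorem fcsScanGo_steps (lines : List String) (prev_boundary : Int) :
    ∀ (b : ℕ) (n : ℕ) (j c : Int), (j - prev_boundary).toNat ≤ n →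
      (∀ k : Int, j - (b : Int) < k → k ≤ j → prev_boundary < k ∧ pvBlank lines k = true) →
      c + (b : Int) < 5 →
      fcsScanGo lines prev_boundary n j c =
        fcsScanGo lines prev_boundary (j - (b : Int) - prev_boundary).toNat (j - (b : Int)) (c + (b : Int)) := by
  intro b
  induction b with
  | zero =>
    intro n j c hn _ _
    have := fcsScanGo_fuel lines prev_boundary n (j - prev_boundary).toNat j c hn (le_refl _)
    simpa using this
  | succ b ih =>
    intro n j c hn hblank hc
    have hj := hblank j (by push_cast; omega) (le_refl _)
    obtain ⟨hjp, hbl⟩ := hj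
    obtain ⟨s, hget, hs⟩ := (pvBlank_true_iff lines j).mp hbl
    cases n with
    | zero => omega
    | succ n =>
      simp only [fcsScanGo, if_pos hjp, hget, if_pos hs]
      have h5 : ¬ (c + 1 = 5) := by push_cast at hc; omega
      rw [if_neg h5]
      have hrec := ih n (j - 1) (c + 1) (by omega)
        (by intro k h1 h2; exact hblank k (by push_cast at h1 ⊢; omega) (by omega))
        (by push_cast at hc ⊢; omega)
      rw [hrec]
      have e1 : j - 1 - (b : Int) = j - ((b : ℕ) + 1 : ℕ) := by push_cast; ring
      have e2 : c + 1 + (b : Int) = c + ((b : ℕ) + 1 : ℕ) := by push_cast; ring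
      rw [e1, e2]

-- main loop equivalence: under in-range reads, A's outer loop equals B's scan
theorem outer_eq_scan (lines : List String) (prev_boundary : Int) :
    ∀ (n : ℕ) (i : Int), (i - prev_boundary).toNat ≤ n →
      (∀ k : Int, prev_boundary < k → k ≤ i → (PySem.List.pyGet? lines k).isSome) →
      fcsOuterGo lines prev_boundary n i =
        fcsScanGo lines prev_boundary (i - prev_boundary).toNat i 0 := by
  intro n
  induction n with
  | zero =>
    intro i hn H
    have h0 : (i - prev_boundary).toNat = 0 := by omega
    rw [h0]
    rfl
  | succ n ih =>
    intro i hn H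
    by_cases hi : i > prev_boundary
    · obtain ⟨hb0, hj, hblank, hstop⟩ := fcsInner_spec lines prev_boundary i 0
      simp only [fcsOuterGo, if_pos hi]
      by_cases h5 : (fcsInner lines prev_boundary i 0).1 ≥ 5
      · -- A returns i + 1; B counts 5 blanks i … i-4 and returns (i-4)+5
        rw [if_pos h5]
        have hstep := fcsScanGo_steps lines prev_boundary 4 (i - prev_boundary).toNat i 0
          (le_refl _)
          (by intro k h1 h2; exact hblank k (by push_cast at h1 ⊢; omega) h2)
          (by norm_num)
        rw [hstep]
        have hp4 : prev_boundary < i - 4 := (hblank (i - 4) (by omega) (by omega)).1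
        have hfe : (i - (4 : ℤ) - prev_boundary).toNat = ((i - 4 - prev_boundary).toNat - 1) + 1 := by
          omega
        rw [show ((4:ℕ) : Int) = 4 from rfl] at *
        rw [hfe]
        obtain ⟨s, hget, hs⟩ := (pvBlank_true_iff lines (i - 4)).mp (hblank (i - 4) (by omega) (by omega)).2
        simp only [fcsScanGo, if_pos (show i - (4:Int) > prev_boundary from hp4), hget, if_pos hs]
        norm_num
        omega
      · rw [if_neg h5]
        by_cases hpos : (fcsInner lines prev_boundary i 0).1 > 0
        · -- A skips the (short) blank run to the stop index; B walks through it
          rw [if_pos hpos]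
          have hIH := ih (fcsInner lines prev_boundary i 0).2 (by omega)
            (by intro k h1 h2; exact H k h1 (by omega))
          rw [hIH]
          have hstep := fcsScanGo_steps lines prev_boundary (fcsInner lines prev_boundary i 0).1.toNat
            (i - prev_boundary).toNat i 0 (le_refl _)
            (by intro k h1 h2
                refine hblank k ?_ h2
                omega)
            (by omega)
          rw [hstep]
          have hr2 : i - ((fcsInner lines prev_boundary i 0).1.toNat : Int) = (fcsInner lines prev_boundary i 0).2 := by
            omega
          rw [hr2]
          -- at the stop index: boundary or non-blank; either way the counter is irrelevant
          rcases hstop with hst | hst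
          · have h0 : ((fcsInner lines prev_boundary i 0).2 - prev_boundary).toNat = 0 := by omega
            rw [h0]
            rfl
          · by_cases hp2 : (fcsInner lines prev_boundary i 0).2 > prev_boundary
            · have hsome := H (fcsInner lines prev_boundary i 0).2 hp2 (by omega)
              cases hget : PySem.List.pyGet? lines (fcsInner lines prev_boundary i 0).2 with
              | none => rw [hget] at hsome; simp at hsome
              | some s =>
                have hns : ¬ (PySem.Str.strip s = "") := by
                  intro hcon
                  rw [(pvBlank_true_iff lines (fcsInner lines prev_boundary i 0).2).mpr ⟨s, hget, hcon⟩] at hst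
                  simp at hst
                have hfe : ((fcsInner lines prev_boundary i 0).2 - prev_boundary).toNat =
                    (((fcsInner lines prev_boundary i 0).2 - 1 - prev_boundary).toNat) + 1 := by omega
                rw [hfe]
                simp only [fcsScanGo, if_pos hp2, hget, if_neg hns]
            · have h0 : ((fcsInner lines prev_boundary i 0).2 - prev_boundary).toNat = 0 := by omega
              rw [h0]
              rfl
        · -- no blank at i: both loops step to i-1 with a fresh state
          rw [if_neg hpos]
          have hieq : (fcsInner lines prev_boundary i 0).2 = i := by omega
          have hsome := H i hi (le_refl _)
          cases hget : PySem.List.pyGet? lines i with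
          | none => rw [hget] at hsome; simp at hsome
          | some s =>
            have hns : ¬ (PySem.Str.strip s = "") := by
              intro hcon
              rw [hieq] at hstop
              exact hstop.elim (by omega)
                (fun h => by rw [(pvBlank_true_iff lines i).mpr ⟨s, hget, hcon⟩] at h; simp at h)
            have hfe : (i - prev_boundary).toNat = ((i - 1 - prev_boundary).toNat) + 1 := by omega
            rw [hfe]
            simp only [fcsScanGo, if_pos hi, hget, if_neg hns]
            exact ih (i - 1) (by omega) (by intro k h1 h2; exact H k h1 (by omega))
    · have h0 : (i - prev_boundary).toNat = 0 := by omega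
      rw [h0]
      simp only [fcsOuterGo, if_neg hi]
      rfl
-- ===== VERDICT (by name: the statement is the Claim_ definition above) =====
theorem find_chapter_start_spec : Claim_equal_find_chapter_start := by
  intro lines em_dash_line prev_boundary _ hpre
  unfold Spec_find_chapter_start find_chapter_start find_chapter_start_alt
  refine outer_eq_scan lines prev_boundary (em_dash_line - 1 - prev_boundary).toNat
    (em_dash_line - 1) (le_refl _) ?_
  intro k h1 h2
  rcases hpre with h | h
  · omega
  · have hin : PySem.Raise.InRange lines.length k := by
      unfold PySem.Raise.InRange
      constructor <;> omega
    rw [Option.isSome_iff_ne_none]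
    intro hnone
    rw [PySem.List.pyGet?_eq_none_iff] at hnone
    exact hnone hin
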